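-- pv_equiv track=rewrite | github.com/phatfil/RotaPython | WidgetTools.py | rangeCalc
-- ===== SOURCE A (Python) =====
-- def rangeCalc(firstCell, lastCell):
--     fcrow = firstCell[0]
--     fccol = firstCell[1]
--     scrow = lastCell[0]
--     sccol = lastCell[1]
--
--     days = (((scrow+1)-(fcrow+1))*7)-(fccol+1)+(sccol+2)
--     print (days)
--
--     cellRange = [[fcrow, fccol]]
--
--     for a in range(1, days):
--         if fccol == 6:
--             fccol = 0
--             fcrow += 1
--             cellRange.append([fcrow, fccol])
--         else:
--             fccol += 1
--             cellRange.append([fcrow, fccol])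
--
--     print (cellRange)
--     return cellRange
-- ===== SOURCE B (Python) =====
-- def rangeCalc(firstCell, lastCell):
--     fcrow, fccol = firstCell
--     scrow, sccol = lastCell
--     days = (scrow - fcrow) * 7 - fccol + sccol + 1
--     print(days)
--
--     # column stream: one entry per day, wrapping to Sunday after Saturday (column 6)
--     cols = [fccol]
--     for _ in range(days - 1):
--         cols.append(0 if cols[-1] == 6 else cols[-1] + 1)
--
--     # the row advances exactly where the column jumps backwards
--     rows = [fcrow]
--     for prev, cur in zip(cols, cols[1:]):
--         rows.append(rows[-1] + (cur < prev))
--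
--     cellRange = [[r, c] for r, c in zip(rows, cols)]
--     print(cellRange)
--     return cellRange
-- ===== Notes on version B (the rewrite author's own statement) =====
-- stated objective: alternative
-- what changed: B splits the single stateful walk into two independent streams: it first generates the column sequence alone, then derives the row sequence as a running count of the column stream's backward jumps, and zips the two; A instead carries a mutable (row, column) cursor whose wrap branch updates both at once.
import Mathlib
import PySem

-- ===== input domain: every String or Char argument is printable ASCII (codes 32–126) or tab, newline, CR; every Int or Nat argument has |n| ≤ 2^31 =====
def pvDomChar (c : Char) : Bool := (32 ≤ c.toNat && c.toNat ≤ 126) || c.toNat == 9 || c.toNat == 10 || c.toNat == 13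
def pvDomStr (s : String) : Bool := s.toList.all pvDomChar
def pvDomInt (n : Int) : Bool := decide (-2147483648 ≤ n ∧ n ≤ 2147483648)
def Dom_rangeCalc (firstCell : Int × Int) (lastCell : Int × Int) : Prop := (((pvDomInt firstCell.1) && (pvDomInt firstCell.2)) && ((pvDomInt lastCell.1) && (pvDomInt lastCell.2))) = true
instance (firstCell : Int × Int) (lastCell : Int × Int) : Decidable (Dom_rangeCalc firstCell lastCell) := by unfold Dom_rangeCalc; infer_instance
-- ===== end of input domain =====

-- B splits A's single stateful walk into two streams — the column sequence, then the row
-- sequence as a running count of the column stream's backward jumps — and zips them.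
-- Return-value equivalence only: both Pythons also print `days` and the list (identical output).

-- ===== PORT A =====
-- loop body of A's for-loop (the state is (fcrow, fccol, cellRange))
def rangeCalcStep (st : Int × Int × List (List Int)) : Int × Int × List (List Int) :=
  match st with
  | (fcrow, fccol, cellRange) =>
    if fccol == 6 then (fcrow + 1, 0, cellRange ++ [[fcrow + 1, 0]])
    else (fcrow, fccol + 1, cellRange ++ [[fcrow, fccol + 1]])

def rangeCalc (firstCell : Int × Int) (lastCell : Int × Int) : List (List Int) :=
  let fcrow := firstCell.1
  let fccol := firstCell.2
  let scrow := lastCell.1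
  let sccol := lastCell.2
  let days := (((scrow + 1) - (fcrow + 1)) * 7) - (fccol + 1) + (sccol + 2)
  ((PySem.List.pyRange 1 days 1).foldl (fun st _ => rangeCalcStep st)
    (fcrow, fccol, [[fcrow, fccol]])).2.2

-- ===== PORT B =====
-- Source B: cols.append(0 if cols[-1] == 6 else cols[-1] + 1)  (cols is never empty)
def colsStep (cols : List Int) : List Int :=
  match PySem.List.pyGet? cols (-1) with
  | some c => cols ++ [if c == 6 then 0 else c + 1]
  | none => cols

-- Source B: rows.append(rows[-1] + (cur < prev))  (rows is never empty)
def rowsStep (rows : List Int) (pc : Int × Int) : List Int :=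
  match PySem.List.pyGet? rows (-1) with
  | some r => rows ++ [r + (if pc.2 < pc.1 then 1 else 0)]
  | none => rows

def rangeCalc_alt (firstCell : Int × Int) (lastCell : Int × Int) : List (List Int) :=
  let fcrow := firstCell.1
  let fccol := firstCell.2
  let scrow := lastCell.1
  let sccol := lastCell.2
  let days := (scrow - fcrow) * 7 - fccol + sccol + 1
  let cols := (PySem.List.pyRange 0 (days - 1) 1).foldl (fun cs _ => colsStep cs) [fccol]
  let rows := (cols.zip (PySem.List.slice cols (some 1) none)).foldl rowsStep [fcrow]
  (rows.zip cols).map (fun rc => [rc.1, rc.2])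

-- ===== PRECONDITION & SPEC =====
def Spec_rangeCalc (firstCell : Int × Int) (lastCell : Int × Int) (out : List (List Int)) : Prop := out = rangeCalc_alt firstCell lastCell
instance (firstCell : Int × Int) (lastCell : Int × Int) (out : List (List Int)) : Decidable (Spec_rangeCalc firstCell lastCell out) := by unfold Spec_rangeCalc; infer_instance

-- ===== CLAIM (what is proved, stated in full; the proofs are below) =====
def Claim_equal_rangeCalc : Prop := ∀ (firstCell : Int × Int) (lastCell : Int × Int), Dom_rangeCalc firstCell lastCell → Spec_rangeCalc firstCell lastCell (rangeCalc firstCell lastCell)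

-- ===== LEMMAS AND PROOFS =====

-- the column after k steps of the walk
def colF (c0 : Int) : Nat → Int
  | 0 => c0
  | k + 1 => if colF c0 k = 6 then 0 else colF c0 k + 1

-- the row after k steps of the walk
def rowF (r0 c0 : Int) : Nat → Int
  | 0 => r0
  | k + 1 => if colF c0 k = 6 then rowF r0 c0 k + 1 else rowF r0 c0 k

-- the row advances exactly where the column jumps backwards
theorem rowF_succ (r0 c0 : Int) (k : Nat) :
    rowF r0 c0 (k + 1) = rowF r0 c0 k + (if colF c0 (k + 1) < colF c0 k then 1 else 0) := by
  by_cases h : colF c0 k = 6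
  · simp [rowF, colF, h]
  · simp [rowF, colF, h]

-- invariant of A's loop
theorem pv_a_inv (r0 c0 : Int) (n : Nat) :
    (List.range n).foldl (fun st (_ : Nat) => rangeCalcStep st) (r0, c0, [[r0, c0]])
    = (rowF r0 c0 n, colF c0 n,
       (List.range (n + 1)).map (fun k => [rowF r0 c0 k, colF c0 k])) := by
  induction n with
  | zero => simp [rowF, colF, List.range_succ]
  | succ n ih =>
    rw [List.range_succ, List.foldl_append, ih]
    simp only [List.foldl_cons, List.foldl_nil, rangeCalcStep, beq_iff_eq]
    rw [List.range_succ (n := n + 1), List.map_append]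
    by_cases h6 : colF c0 n = 6
    · simp [rowF, colF, h6]
    · simp [rowF, colF, h6]

-- invariant of B's first loop: the column stream
theorem pv_cols_inv (c0 : Int) (m : Nat) :
    (List.range m).foldl (fun cs (_ : Nat) => colsStep cs) [c0]
    = (List.range (m + 1)).map (colF c0) := by
  induction m with
  | zero => simp [colF, List.range_succ]
  | succ m ih =>
    rw [List.range_succ, List.foldl_append, ih]
    have hsplit : (List.range (m + 1)).map (colF c0)
        = (List.range m).map (colF c0) ++ [colF c0 m] := by
      rw [List.range_succ]; simp
    have h2 : (List.range (m + 2)).map (colF c0)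
        = (List.range (m + 1)).map (colF c0) ++ [colF c0 (m + 1)] := by
      rw [List.range_succ (n := m + 1)]; simp
    simp only [List.foldl_cons, List.foldl_nil, colsStep, hsplit,
      PySem.List.pyGet?_neg_one_append_singleton, h2]
    simp [colF]

-- zipping a stream with its own tail pairs consecutive entries
theorem pv_zip_tail (f : Nat → Int) (m : Nat) :
    ((List.range (m + 1)).map f).zip (((List.range (m + 1)).map f).tail)
    = (List.range m).map (fun k => (f k, f (k + 1))) := by
  apply List.ext_getElem
  · simp
  · intro i h1 h2
    simp [List.getElem_zip, List.getElem_tail]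

-- invariant of B's second loop: the row stream
theorem pv_rows_inv (r0 c0 : Int) (m : Nat) :
    ((List.range m).map (fun k => (colF c0 k, colF c0 (k + 1)))).foldl rowsStep [r0]
    = (List.range (m + 1)).map (rowF r0 c0) := by
  induction m with
  | zero => simp [rowF, List.range_succ]
  | succ m ih =>
    rw [List.range_succ, List.map_append, List.foldl_append, ih]
    have hsplit : (List.range (m + 1)).map (rowF r0 c0)
        = (List.range m).map (rowF r0 c0) ++ [rowF r0 c0 m] := by
      rw [List.range_succ]; simp
    have h2 : (List.range (m + 2)).map (rowF r0 c0)
        = (List.range (m + 1)).map (rowF r0 c0) ++ [rowF r0 c0 (m + 1)] := by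
      rw [List.range_succ (n := m + 1)]; simp
    simp only [List.map_cons, List.map_nil, List.foldl_cons, List.foldl_nil, hsplit, h2]
    unfold rowsStep
    rw [PySem.List.pyGet?_neg_one_append_singleton]
    simp [rowF_succ]

-- ===== VERDICT (by name: the statement is the Claim_ definition above) =====
theorem rangeCalc_spec : Claim_equal_rangeCalc := by
  intro fc lc _
  unfold Spec_rangeCalc rangeCalc rangeCalc_alt
  simp only [PySem.List.pyRange_one, List.foldl_map, PySem.List.slice_from_one]
  set r0 := fc.1; set c0 := fc.2; set sr := lc.1; set sc := lc.2
  have hdays : (((sr + 1) - (r0 + 1)) * 7) - (c0 + 1) + (sc + 2)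
      = (sr - r0) * 7 - c0 + sc + 1 := by ring
  rw [hdays]
  set days := (sr - r0) * 7 - c0 + sc + 1 with hd
  have hn : (days - 1 - 0).toNat = (days - 1).toNat := by omega
  rw [hn, pv_a_inv r0 c0 ((days - 1).toNat), pv_cols_inv c0 ((days - 1).toNat),
    pv_zip_tail (colF c0) ((days - 1).toNat), pv_rows_inv r0 c0 ((days - 1).toNat)]
  rw [List.zip_map']
  simp
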